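-- pv_equiv track=rewrite | github.com/h0ngc/PS-TTS | check_silence.py | find_silence_intervals
-- ===== SOURCE A (Python) =====
-- def find_silence_intervals(mask, hop_length=256, sr=22050):
--     intervals = []
--     current_start = None
--     for i, m in enumerate(mask):
--         if m and current_start is None:
--             current_start = i
--         elif not m and current_start is not None:
--             intervals.append((current_start, i))
--             current_start = None
--     if current_start is not None:
--         intervals.append((current_start, len(mask)))
--
--     # 0.4초 이상 지속되는 구간 찾기
--     min_length = int(0.3 * sr / hop_length)
--     long_intervals = [(start, end) for start, end in intervals if (end - start) >= min_length]
--     silence_length = sum(end - start for start, end in long_intervals)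
--     return long_intervals,silence_length
-- ===== SOURCE B (Python) =====
-- from itertools import groupby
--
-- def find_silence_intervals(mask, hop_length=256, sr=22050):
--     # groupby-based run finder: walk runs of equal truthiness, threading position
--     intervals = []
--     pos = 0
--     for is_true, group in groupby(mask, key=bool):
--         length = sum(1 for _ in group)
--         if is_true:
--             intervals.append((pos, pos + length))
--         pos += length
--     min_length = int(0.3 * sr / hop_length)
--     long_intervals = [(start, end) for start, end in intervals if (end - start) >= min_length]
--     silence_length = sum(end - start for start, end in long_intervals)
--     return long_intervals, silence_length
-- ===== Notes on version B (the rewrite author's own statement) =====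
-- stated objective: idiomatic
-- what changed: Replaces the nullable-start state-machine loop with itertools.groupby over the mask's truthiness runs, threading a running position to emit each True run as an interval; the min_length filter and sum are unchanged.
import Mathlib
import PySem

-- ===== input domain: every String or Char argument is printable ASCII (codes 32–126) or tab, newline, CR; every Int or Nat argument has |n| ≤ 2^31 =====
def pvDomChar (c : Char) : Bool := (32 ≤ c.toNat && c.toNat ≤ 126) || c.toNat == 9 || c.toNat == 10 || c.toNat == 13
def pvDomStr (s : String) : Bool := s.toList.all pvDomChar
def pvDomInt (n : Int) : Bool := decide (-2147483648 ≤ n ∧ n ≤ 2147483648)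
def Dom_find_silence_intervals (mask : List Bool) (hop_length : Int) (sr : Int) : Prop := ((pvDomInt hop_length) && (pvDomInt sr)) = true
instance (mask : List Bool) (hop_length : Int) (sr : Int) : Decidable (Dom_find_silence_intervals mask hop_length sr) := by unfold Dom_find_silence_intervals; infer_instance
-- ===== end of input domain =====

-- B is the same O(n) task written as a run-length (groupby) decomposition instead of A's
-- nullable-start state machine; objective: idiomatic, no speed claim.

-- Shared helper: exact model of Python's `int(0.3 * sr / hop_length)` under IEEE-754 binary64.
-- pvRoundD rounds a rational to the nearest 53-bit-significand value (ties to even); exact on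
-- the magnitudes reachable here (no overflow/subnormals for |sr|,|hop| ≤ 2^31).
def pvPow2 (e : Int) : ℚ := if 0 ≤ e then ((2 : ℚ) ^ e.toNat) else 1 / (2 : ℚ) ^ (-e).toNat

def pvRoundD (q : ℚ) : ℚ :=
  if q = 0 then 0 else
    let qa : ℚ := |q|
    let e0 : Int := (Nat.log2 qa.num.natAbs : Int) - (Nat.log2 qa.den : Int)
    let e : Int := if qa < pvPow2 e0 then e0 - 1 else e0
    let s : ℚ := pvPow2 (e - 52)
    let x : ℚ := qa / s
    let n0 : Int := ⌊x⌋
    let f : ℚ := x - (n0 : ℚ)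
    let n : Int := if (1 : ℚ)/2 < f ∨ (f = 1/2 ∧ n0 % 2 ≠ 0) then n0 + 1 else n0
    (if q < 0 then -1 else 1) * (n : ℚ) * s

-- 0.3 as a binary64 double, exactly
def pvFloat03 : ℚ := (5404319552844595 : ℚ) / 18014398509481984

-- int() truncates toward zero
def pvTruncD (q : ℚ) : Int := if 0 ≤ q then ⌊q⌋ else -⌊-q⌋

def pvMinLength (hop_length sr : Int) : Int :=
  pvTruncD (pvRoundD (pvRoundD (pvFloat03 * (sr : ℚ)) / (hop_length : ℚ)))

-- ===== PORT A =====
def find_silence_intervals (mask : List Bool) (hop_length : Int) (sr : Int) : (List (Int × Int)) × Int :=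
  let st := (PySem.List.enumerate mask).foldl
    (fun (st : List (Int × Int) × Option Int) (p : Int × Bool) =>
      if p.2 && st.2.isNone then (st.1, some p.1)
      else if (!p.2) && st.2.isSome then (st.1 ++ [(st.2.getD 0, p.1)], none)
      else st) ([], none)
  let intervals := match st.2 with
    | some s => st.1 ++ [(s, (mask.length : Int))]
    | none => st.1
  let min_length := pvMinLength hop_length sr
  let long_intervals := intervals.filter (fun se => min_length ≤ se.2 - se.1)
  let silence_length := long_intervals.foldl (fun a se => a + (se.2 - se.1)) 0
  (long_intervals, silence_length)

-- ===== PORT B =====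
-- groupby(mask, key=bool): successive runs as (value, length) pairs
def pvRuns : List Bool → List (Bool × Int)
  | [] => []
  | x :: xs =>
      (x, ((xs.takeWhile (· == x)).length : Int) + 1) :: pvRuns (xs.dropWhile (· == x))
  termination_by xs => xs.length
  decreasing_by simpa using Nat.lt_succ_of_le (List.length_dropWhile_le (· == x) xs)

def find_silence_intervals_alt (mask : List Bool) (hop_length : Int) (sr : Int) : (List (Int × Int)) × Int :=
  let st := (pvRuns mask).foldl
    (fun (st : List (Int × Int) × Int) (r : Bool × Int) =>
      ((if r.1 then st.1 ++ [(st.2, st.2 + r.2)] else st.1), st.2 + r.2)) ([], 0)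
  let intervals := st.1
  let min_length := pvMinLength hop_length sr
  let long_intervals := intervals.filter (fun se => min_length ≤ se.2 - se.1)
  let silence_length := long_intervals.foldl (fun a se => a + (se.2 - se.1)) 0
  (long_intervals, silence_length)

-- ===== PRECONDITION & SPEC =====
-- Pre excludes hop_length = 0, on which Python A raises ZeroDivisionError.
def Pre_find_silence_intervals (mask : List Bool) (hop_length : Int) (sr : Int) : Prop := hop_length ≠ 0
instance (mask : List Bool) (hop_length : Int) (sr : Int) : Decidable (Pre_find_silence_intervals mask hop_length sr) := by unfold Pre_find_silence_intervals; infer_instance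
def pvWitness_find_silence_intervals : List Bool × Int × Int := ([true, true, false, true], 256, 22050)

def Spec_find_silence_intervals (mask : List Bool) (hop_length : Int) (sr : Int) (out : (List (Int × Int)) × Int) : Prop := out = find_silence_intervals_alt mask hop_length sr
instance (mask : List Bool) (hop_length : Int) (sr : Int) (out : (List (Int × Int)) × Int) : Decidable (Spec_find_silence_intervals mask hop_length sr out) := by unfold Spec_find_silence_intervals; infer_instance

-- ===== CLAIM (what is proved, stated in full; the proofs are below) =====
def Claim_equal_find_silence_intervals : Prop := ∀ (mask : List Bool) (hop_length : Int) (sr : Int), Dom_find_silence_intervals mask hop_length sr → Pre_find_silence_intervals mask hop_length sr → Spec_find_silence_intervals mask hop_length sr (find_silence_intervals mask hop_length sr)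

-- ===== LEMMAS AND PROOFS =====

-- abstract description of the list of True runs of xs, indices starting at i, cur = open start
def runSpec : List Bool → Int → Option Int → List (Int × Int)
  | [], _, none => []
  | [], i, some s => [(s, i)]
  | true :: xs, i, none => runSpec xs (i + 1) (some i)
  | true :: xs, i, some s => runSpec xs (i + 1) (some s)
  | false :: xs, i, none => runSpec xs (i + 1) none
  | false :: xs, i, some s => (s, i) :: runSpec xs (i + 1) none

def stepA (st : List (Int × Int) × Option Int) (p : Int × Bool) : List (Int × Int) × Option Int :=
  if p.2 && st.2.isNone then (st.1, some p.1)
  else if (!p.2) && st.2.isSome then (st.1 ++ [(st.2.getD 0, p.1)], none)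
  else st

def finishA (st : List (Int × Int) × Option Int) (e : Int) : List (Int × Int) :=
  match st.2 with
  | some s => st.1 ++ [(s, e)]
  | none => st.1

theorem A_loop (xs : List Bool) : ∀ (i : Int) (acc : List (Int × Int)) (cur : Option Int),
    finishA ((PySem.List.enumerate xs i).foldl stepA (acc, cur)) (i + xs.length)
      = acc ++ runSpec xs i cur := by
  induction xs with
  | nil =>
      intro i acc cur
      cases cur <;> simp [PySem.List.enumerate_nil, finishA, runSpec]
  | cons m xs ih =>
      intro i acc cur
      rw [PySem.List.enumerate_cons]
      have hlen : (i : Int) + ((xs.length + 1 : Nat) : Int) = (i + 1) + (xs.length : Int) := by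
        push_cast; ring
      simp only [List.foldl_cons, List.length_cons]
      rw [hlen]
      cases m <;> cases cur <;> simp [stepA, ih, runSpec, List.append_assoc]
  
def stepB (st : List (Int × Int) × Int) (r : Bool × Int) : List (Int × Int) × Int :=
  ((if r.1 then st.1 ++ [(st.2, st.2 + r.2)] else st.1), st.2 + r.2)

theorem runSpec_open (xs : List Bool) : ∀ (i s : Int),
    runSpec xs i (some s)
      = (s, i + ((xs.takeWhile (· == true)).length : Int))
          :: runSpec (xs.dropWhile (· == true)) (i + ((xs.takeWhile (· == true)).length : Int)) none := by
  induction xs with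
  | nil => intro i s; simp [runSpec]
  | cons m xs ih =>
      intro i s
      cases m
      · simp [runSpec, List.takeWhile, List.dropWhile]
      · simp only [runSpec, List.takeWhile_cons, List.dropWhile_cons]
        simp only [show ((true == true) = true) by rfl, if_true, List.length_cons, ih]
        push_cast; ring_nf

theorem runSpec_skip (xs : List Bool) : ∀ (i : Int),
    runSpec xs i none
      = runSpec (xs.dropWhile (· == false)) (i + ((xs.takeWhile (· == false)).length : Int)) none := by
  induction xs with
  | nil => intro i; simp [runSpec]
  | cons m xs ih =>
      intro i
      cases m
      · simp only [runSpec, List.takeWhile_cons, List.dropWhile_cons]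
        simp only [show ((false == false) = true) by rfl, if_true, List.length_cons, ih]
        push_cast; ring_nf
      · simp [runSpec, List.takeWhile, List.dropWhile]

theorem B_loop (xs : List Bool) : ∀ (pos : Int) (acc : List (Int × Int)),
    ((pvRuns xs).foldl stepB (acc, pos)).1 = acc ++ runSpec xs pos none := by
  induction xs using pvRuns.induct with
  | case1 => intro pos acc; simp [pvRuns, runSpec]
  | case2 x xs ih =>
      intro pos acc
      rw [pvRuns]
      cases x
      · have h : pos + (((xs.takeWhile (fun x => x == false)).length : Int) + 1)
            = pos + 1 + ((xs.takeWhile (fun x => x == false)).length : Int) := by ring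
        simp only [List.foldl_cons, stepB, Bool.false_eq_true, if_false]
        rw [ih, show runSpec (false :: xs) pos none = runSpec xs (pos + 1) none from rfl,
          runSpec_skip xs (pos + 1), ← h]
      · simp only [List.foldl_cons, stepB, ite_true]
        rw [ih]
        rw [show runSpec (true :: xs) pos none = runSpec xs (pos + 1) (some pos) from rfl,
          runSpec_open]
        simp only [List.append_assoc, List.singleton_append]
        congr 2 <;> (push_cast; ring_nf)

-- ===== VERDICT (by name: the statement is the Claim_ definition above) =====

theorem find_silence_intervals_spec : Claim_equal_find_silence_intervals := by
  intro mask hop_length sr _ _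
  unfold Spec_find_silence_intervals find_silence_intervals find_silence_intervals_alt
  have hA : (match ((PySem.List.enumerate mask).foldl stepA ([], none)).2 with
      | some s => ((PySem.List.enumerate mask).foldl stepA ([], none)).1 ++ [(s, (mask.length : Int))]
      | none => ((PySem.List.enumerate mask).foldl stepA ([], none)).1)
      = runSpec mask 0 none := by
    have := A_loop mask 0 [] none
    simpa [finishA] using this
  have hB : ((pvRuns mask).foldl stepB ([], 0)).1 = runSpec mask 0 none := by
    simpa using B_loop mask 0 []
  simp only [show (fun (st : List (Int × Int) × Option Int) (p : Int × Bool) =>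
      if p.2 && st.2.isNone then (st.1, some p.1)
      else if (!p.2) && st.2.isSome then (st.1 ++ [(st.2.getD 0, p.1)], none)
      else st) = stepA from rfl,
    show (fun (st : List (Int × Int) × Int) (r : Bool × Int) =>
      ((if r.1 then st.1 ++ [(st.2, st.2 + r.2)] else st.1), st.2 + r.2)) = stepB from rfl]
  rw [hA, hB]
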